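-- pv_equiv track=rewrite | github.com/Shepherd2442/AoC2k20 | day4.py | parse_passports
-- ===== SOURCE A (Python) =====
-- def parse_passports(input):
--     documents, document = [], {}
--     for line in input:
--         if line == "":
--             documents.append(document)
--             document = {}
--             continue
--         data_pairs = line.split(" ")
--         for data_pair in data_pairs:
--             field, value = data_pair.split(":")
--             document[field] = value
--     documents.append(document)
--     return documents
-- ===== SOURCE B (Python) =====
-- def parse_passports(input):
--     # Recursive decomposition: split off the first blank-line-separated group,
--     # turn it into a dict in one comprehension, recurse on the remainder.
--     group, rest = split_first_group(input)
--     doc = dict(pair.split(":") for line in group for pair in line.split(" "))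
--     if not rest:
--         return [doc]
--     return [doc] + parse_passports(rest[1:])
--
--
-- def split_first_group(lines):
--     if not lines or lines[0] == "":
--         return [], lines
--     group, rest = split_first_group(lines[1:])
--     return [lines[0]] + group, rest
-- ===== Notes on version B (the rewrite author's own statement) =====
-- stated objective: alternative
-- what changed: Replaces A's single imperative pass that mutates a running dict and a documents list with a recursive decomposition: split off the first blank-line-separated group, build its dict in one comprehension over the group's pairs, and recurse on the remaining lines.
-- outside the precondition, e.g. on parse_passports(['a']): A raises ValueError, B raises ValueError; on parse_passports(['a:b:c']): A raises ValueError, B raises ValueError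
import Mathlib
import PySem

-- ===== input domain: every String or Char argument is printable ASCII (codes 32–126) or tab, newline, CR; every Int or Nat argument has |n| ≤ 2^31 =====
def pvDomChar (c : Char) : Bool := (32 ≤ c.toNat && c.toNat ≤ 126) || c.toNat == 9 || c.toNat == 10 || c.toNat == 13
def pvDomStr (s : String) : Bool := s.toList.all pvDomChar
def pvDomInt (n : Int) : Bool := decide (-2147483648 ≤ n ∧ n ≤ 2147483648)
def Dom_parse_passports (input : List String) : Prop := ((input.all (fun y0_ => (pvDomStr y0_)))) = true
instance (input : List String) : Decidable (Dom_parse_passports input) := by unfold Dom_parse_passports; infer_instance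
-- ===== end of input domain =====

-- B replaces A's single imperative pass (mutating a running dict and documents list) with a
-- recursive decomposition: split off the first blank-separated group, build its dict, recurse
-- (objective: alternative decomposition, same cost).

-- ===== PORT A =====
-- A's loop body: the state is (documents so far, current document dict).
def pvAStep (st : List (List (String × String)) × PySem.Dict String String)
    (line : String) : List (List (String × String)) × PySem.Dict String String :=
  if line = "" then (st.1 ++ [st.2.items], PySem.Dict.empty)
  else
    let data_pairs := (PySem.Str.split? line " ").getD []
    (st.1, data_pairs.foldl
      (fun d data_pair =>
        -- `field, value = data_pair.split(":")` raises unless there are exactly two parts;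
        -- Pre_ excludes those inputs, so the `.getD ""` defaults are never reached inside Pre_.
        let parts := (PySem.Str.split? data_pair ":").getD []
        d.insert ((PySem.List.pyGet? parts 0).getD "") ((PySem.List.pyGet? parts 1).getD ""))
      st.2)

def parse_passports (input : List String) : List (List (String × String)) :=
  let st := input.foldl pvAStep ([], PySem.Dict.empty)
  st.1 ++ [st.2.items]

-- ===== PORT B =====
-- split_first_group: the longest blank-free prefix and the remainder (starting at the blank).
def pvSplitFirstGroup : List String → List String × List String
  | [] => ([], [])
  | line :: rest =>
    if line = "" then ([], line :: rest)
    else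
      let gr := pvSplitFirstGroup (rest)
      (line :: gr.1, gr.2)

-- remainder is never longer than the input (cited by the port's decreasing_by)
theorem pvSplitFirstGroup_snd_len (lines : List String) :
    (pvSplitFirstGroup lines).2.length ≤ lines.length := by
  induction lines with
  | nil => simp [pvSplitFirstGroup]
  | cons l rest ih =>
    by_cases h : l = ""
    · simp [pvSplitFirstGroup, h]
    · simp [pvSplitFirstGroup, h]; omega

-- dict(pair.split(":") for line in group for pair in line.split(" "))
def pvGroupDoc (group : List String) : List (String × String) :=
  ((group.flatMap (fun line => (PySem.Str.split? line " ").getD [])).foldl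
    (fun d pair =>
      let parts := (PySem.Str.split? pair ":").getD []
      d.insert ((PySem.List.pyGet? parts 0).getD "") ((PySem.List.pyGet? parts 1).getD ""))
    PySem.Dict.empty).items

def parse_passports_alt (input : List String) : List (List (String × String)) :=
  let gr := pvSplitFirstGroup input
  match h : gr.2 with
  | [] => [pvGroupDoc gr.1]
  | _ :: rest' => pvGroupDoc gr.1 :: parse_passports_alt rest'
termination_by input.length
decreasing_by
  have := pvSplitFirstGroup_snd_len input
  rw [h] at this; simp at this; omega

-- ===== PRECONDITION & SPEC =====
-- Pre_ excludes exactly the inputs where Python A raises ValueError: a non-blank line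
-- with a space-separated token not containing exactly one ':'.
def Pre_parse_passports (input : List String) : Prop :=
  (input.all (fun line =>
    line == "" || ((PySem.Str.split? line " ").getD []).all (fun p => PySem.Str.count p ":" == 1))) = true
instance (input : List String) : Decidable (Pre_parse_passports input) := by
  unfold Pre_parse_passports; infer_instance

def pvWitness_parse_passports : List String := ["a:1 b:2", "", "c:3"]

def Spec_parse_passports (input : List String) (out : List (List (String × String))) : Prop := out = parse_passports_alt input
instance (input : List String) (out : List (List (String × String))) : Decidable (Spec_parse_passports input out) := by unfold Spec_parse_passports; infer_instance

-- ===== CLAIM (what is proved, stated in full; the proofs are below) =====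
def Claim_equal_parse_passports : Prop := ∀ (input : List String), Dom_parse_passports input → Pre_parse_passports input → Spec_parse_passports input (parse_passports input)

-- ===== LEMMAS AND PROOFS =====

-- the inner per-line dict update of A (named only for the proofs below)
def pvLineStep (d : PySem.Dict String String) (line : String) : PySem.Dict String String :=
  ((PySem.Str.split? line " ").getD []).foldl
    (fun d pair =>
      let parts := (PySem.Str.split? pair ":").getD []
      d.insert ((PySem.List.pyGet? parts 0).getD "") ((PySem.List.pyGet? parts 1).getD ""))
    d

theorem pvAStep_blank (st : List (List (String × String)) × PySem.Dict String String) :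
    pvAStep st "" = (st.1 ++ [st.2.items], PySem.Dict.empty) := by
  simp [pvAStep]

theorem pvAStep_ne (st : List (List (String × String)) × PySem.Dict String String)
    (line : String) (h : line ≠ "") : pvAStep st line = (st.1, pvLineStep st.2 line) := by
  simp [pvAStep, pvLineStep, h]

-- A's fold with accumulated documents = documents prepended to the fold from ([], d)
theorem pvAFold_acc (input : List String) (docs : List (List (String × String)))
    (d : PySem.Dict String String) :
    input.foldl pvAStep (docs, d)
      = (docs ++ (input.foldl pvAStep ([], d)).1, (input.foldl pvAStep ([], d)).2) := by
  induction input generalizing docs d with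
  | nil => simp
  | cons line rest ih =>
    by_cases h : line = ""
    · subst h
      simp only [List.foldl_cons, pvAStep_blank, List.nil_append]
      rw [ih (docs ++ [d.items]) PySem.Dict.empty, ih [d.items] PySem.Dict.empty]
      simp
    · simp only [List.foldl_cons, pvAStep_ne _ _ h]
      exact ih docs _

-- on a blank-free prefix A's fold only updates the current dict
theorem pvAFold_noblank (g : List String) (hg : ∀ l ∈ g, l ≠ "")
    (docs : List (List (String × String))) (d : PySem.Dict String String) :
    g.foldl pvAStep (docs, d) = (docs, g.foldl pvLineStep d) := by
  induction g generalizing d with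
  | nil => rfl
  | cons l rest ih =>
    have hl : l ≠ "" := hg l (by simp)
    simp only [List.foldl_cons, pvAStep_ne _ _ hl]
    exact ih (fun x hx => hg x (by simp [hx])) _

-- pvGroupDoc is the items of the pvLineStep fold (flatMap/foldl fusion)
theorem pvGroupDoc_eq (g : List String) :
    pvGroupDoc g = (g.foldl pvLineStep PySem.Dict.empty).items := by
  unfold pvGroupDoc
  congr 1
  generalize PySem.Dict.empty = d
  induction g generalizing d with
  | nil => rfl
  | cons l rest ih => simp [List.foldl_append, pvLineStep, ih]

-- pvSplitFirstGroup decomposes the input: blank-free group, remainder [] or headed by ""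
theorem pvSplitFirstGroup_spec (input : List String) :
    input = (pvSplitFirstGroup input).1 ++ (pvSplitFirstGroup input).2
      ∧ (∀ l ∈ (pvSplitFirstGroup input).1, l ≠ "")
      ∧ ((pvSplitFirstGroup input).2 = [] ∨ ∃ r, (pvSplitFirstGroup input).2 = "" :: r) := by
  induction input with
  | nil => simp [pvSplitFirstGroup]
  | cons l rest ih =>
    by_cases h : l = ""
    · subst h; simp [pvSplitFirstGroup]
    · obtain ⟨h1, h2, h3⟩ := ih
      refine ⟨?_, ?_, ?_⟩ <;> simp only [pvSplitFirstGroup, if_neg h]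
      · simpa using h1
      · simpa [h] using h2
      · exact h3

-- unfolding lemmas for parse_passports_alt, by the shape of the remainder
theorem pvAlt_nil (input : List String) (h : (pvSplitFirstGroup input).2 = []) :
    parse_passports_alt input = [pvGroupDoc (pvSplitFirstGroup input).1] := by
  rw [parse_passports_alt]
  split
  · rfl
  · rename_i heq; rw [h] at heq; cases heq

theorem pvAlt_cons (input : List String) (l : String) (r : List String)
    (h : (pvSplitFirstGroup input).2 = l :: r) :
    parse_passports_alt input = pvGroupDoc (pvSplitFirstGroup input).1 :: parse_passports_alt r := by
  rw [parse_passports_alt]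
  split
  · rename_i heq; rw [h] at heq; cases heq
  · rename_i heq; rw [h] at heq; injection heq with _ h2; rw [h2]

theorem pv_main (input : List String) :
    parse_passports input = parse_passports_alt input := by
  induction input using parse_passports_alt.induct with
  | case1 input gr h =>
    obtain ⟨h1, h2, _⟩ := pvSplitFirstGroup_spec input
    have h3 : (pvSplitFirstGroup input).2 = [] := h
    rw [pvAlt_nil input h3, pvGroupDoc_eq]
    unfold parse_passports
    conv_lhs => rw [h1, h3]
    rw [List.append_nil, pvAFold_noblank _ h2]
    rfl
  | case2 input gr l rest' h ih =>
    obtain ⟨h1, h2, h3⟩ := pvSplitFirstGroup_spec input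
    have h : (pvSplitFirstGroup input).2 = l :: rest' := h
    have hl : l = "" := by
      rcases h3 with h3 | ⟨r, h3⟩
      · rw [h3] at h; cases h
      · rw [h3] at h; injection h with hh _; exact hh.symm
    rw [pvAlt_cons input l rest' h, pvGroupDoc_eq, ← ih]
    unfold parse_passports
    conv_lhs => rw [h1, h]
    rw [List.foldl_append, pvAFold_noblank _ h2, List.foldl_cons, hl, pvAStep_blank,
      pvAFold_acc]
    simp

-- ===== VERDICT (by name: the statement is the Claim_ definition above) =====
theorem parse_passports_spec : Claim_equal_parse_passports := by
  intro input _ _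
  unfold Spec_parse_passports
  exact pv_main input
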